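-- pv_equiv track=rewrite | github.com/SongSongLook/Trading_Return_Recorder | data_processing.py | calculate_longest_profit_loss_streak
-- ===== SOURCE A (Python) =====
-- def calculate_longest_profit_loss_streak(returns):
--     """計算最長連續獲利和最長連續虧損"""
--     longest_profit = 0
--     longest_loss = 0
--     current_profit = 0
--     current_loss = 0
--
--     for r in returns:
--         if r > 0:
--             current_profit += 1
--             current_loss = 0
--         elif r < 0:
--             current_loss += 1
--             current_profit = 0
--         else:
--             # 當收益率為0時，視為中斷連續性
--             current_profit = 0
--             current_loss = 0
--
--         if current_profit > longest_profit:
--             longest_profit = current_profit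
--         if current_loss > longest_loss:
--             longest_loss = current_loss
--
--     return longest_profit, longest_loss
-- ===== SOURCE B (Python) =====
-- def calculate_longest_profit_loss_streak(returns):
--     """計算最長連續獲利和最長連續虧損"""
--     def sign(r):
--         return 1 if r > 0 else (-1 if r < 0 else 0)
--
--     best_profit = 0
--     best_loss = 0
--     i, n = 0, len(returns)
--     while i < n:
--         s = sign(returns[i])
--         j = i + 1
--         while j < n and sign(returns[j]) == s:
--             j += 1
--         if s == 1:
--             best_profit = max(best_profit, j - i)
--         elif s == -1:
--             best_loss = max(best_loss, j - i)
--         i = j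
--     return best_profit, best_loss
-- ===== Notes on version B (the rewrite author's own statement) =====
-- stated objective: alternative
-- what changed: Replaces the per-element scan with four running counters (current/longest profit and loss streaks updated at every element) by a run-at-a-time two-pointer sweep that finds each maximal same-sign run and takes max of its length per sign, with no per-element streak state.
import Mathlib
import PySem

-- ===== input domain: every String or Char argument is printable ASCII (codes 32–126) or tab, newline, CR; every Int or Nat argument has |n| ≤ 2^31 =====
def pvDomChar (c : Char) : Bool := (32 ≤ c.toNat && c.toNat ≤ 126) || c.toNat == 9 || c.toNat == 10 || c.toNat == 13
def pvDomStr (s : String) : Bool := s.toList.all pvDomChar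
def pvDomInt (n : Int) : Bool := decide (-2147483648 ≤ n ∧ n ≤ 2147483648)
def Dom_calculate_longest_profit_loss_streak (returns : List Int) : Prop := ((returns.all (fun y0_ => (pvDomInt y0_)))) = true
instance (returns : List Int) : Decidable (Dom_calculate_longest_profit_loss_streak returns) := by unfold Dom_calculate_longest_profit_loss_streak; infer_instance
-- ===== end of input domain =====

-- B replaces A's per-element scan with four running counters by a run-at-a-time
-- two-pointer sweep over maximal same-sign runs (alternative decomposition, same O(n) cost).


-- ===== PORT A =====
-- one iteration of A's for-loop over the state (longest_profit, longest_loss, current_profit, current_loss)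
def pvStepA (st : Int × Int × Int × Int) (r : Int) : Int × Int × Int × Int :=
  let lp := st.1; let ll := st.2.1; let cp := st.2.2.1; let cl := st.2.2.2
  let cp' := if r > 0 then cp + 1 else 0
  let cl' := if r < 0 then cl + 1 else 0
  let lp' := if cp' > lp then cp' else lp
  let ll' := if cl' > ll then cl' else ll
  (lp', ll', cp', cl')

def calculate_longest_profit_loss_streak (returns : List Int) : Int × Int :=
  let st := returns.foldl pvStepA (0, 0, 0, 0)
  (st.1, st.2.1)

-- ===== PORT B =====
-- sign(r) from Source B
def pvSign (r : Int) : Int := if r > 0 then 1 else if r < 0 then -1 else 0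

-- Source B's inner while loop: how many leading elements of the list share sign s
def pvRunLen (s : Int) : List Int → Nat
  | [] => 0
  | x :: xs => if pvSign x = s then pvRunLen s xs + 1 else 0

-- Source B's outer while loop: consume one maximal same-sign run per step
def pvGo : List Int → Int → Int → Int × Int
  | [], bp, bl => (bp, bl)
  | x :: xs, bp, bl =>
    let s := pvSign x
    let k := pvRunLen s xs
    let n : Int := (k : Int) + 1
    let bp' := if s = 1 then max bp n else bp
    let bl' := if s = -1 then max bl n else bl
    pvGo (xs.drop k) bp' bl'
termination_by xs => xs.length
decreasing_by simp

def calculate_longest_profit_loss_streak_alt (returns : List Int) : Int × Int :=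
  pvGo returns 0 0

-- ===== PRECONDITION & SPEC =====
def Spec_calculate_longest_profit_loss_streak (returns : List Int) (out : Int × Int) : Prop := out = calculate_longest_profit_loss_streak_alt returns
instance (returns : List Int) (out : Int × Int) : Decidable (Spec_calculate_longest_profit_loss_streak returns out) := by unfold Spec_calculate_longest_profit_loss_streak; infer_instance

-- ===== CLAIM (what is proved, stated in full; the proofs are below) =====
def Claim_equal_calculate_longest_profit_loss_streak : Prop := ∀ (returns : List Int), Dom_calculate_longest_profit_loss_streak returns → Spec_calculate_longest_profit_loss_streak returns (calculate_longest_profit_loss_streak returns)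

-- ===== LEMMAS AND PROOFS =====

theorem pvSign_eq_one {r : Int} : pvSign r = 1 ↔ 0 < r := by
  constructor
  · intro h; by_contra hc; unfold pvSign at h; split_ifs at h <;> omega
  · intro h; unfold pvSign; rw [if_pos h]

theorem pvSign_eq_negone {r : Int} : pvSign r = -1 ↔ r < 0 := by
  constructor
  · intro h; by_contra hc; unfold pvSign at h; split_ifs at h <;> omega
  · intro h; unfold pvSign; rw [if_neg (by omega : ¬ r > 0), if_pos h]

theorem pvSign_eq_zero {r : Int} : pvSign r = 0 ↔ r = 0 := by
  constructor
  · intro h; by_contra hc; unfold pvSign at h; split_ifs at h <;> omega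
  · intro h; unfold pvSign; rw [if_neg (by omega : ¬ r > 0), if_neg (by omega : ¬ r < 0)]

theorem pvStepA_eq (lp ll cp cl r : Int) :
    pvStepA (lp, ll, cp, cl) r =
      if 0 < r then (max lp (cp + 1), max ll 0, cp + 1, 0)
      else if r < 0 then (max lp 0, max ll (cl + 1), 0, cl + 1)
      else (max lp 0, max ll 0, 0, 0) := by
  simp only [pvStepA, max_def]
  split_ifs <;> simp_all <;> omega

theorem pvRunLen_le (s : Int) (xs : List Int) : pvRunLen s xs ≤ xs.length := by
  induction xs with
  | nil => simp [pvRunLen]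
  | cons x xs ih => simp only [pvRunLen, List.length_cons]; split <;> omega

theorem pvRunLen_take (s : Int) (xs : List Int) :
    ∀ r ∈ xs.take (pvRunLen s xs), pvSign r = s := by
  induction xs with
  | nil => simp
  | cons x xs ih =>
    simp only [pvRunLen]
    split
    · rename_i h
      intro r hr
      rcases List.mem_cons.mp (by simpa [List.take_succ_cons] using hr) with h1 | h1
      · exact h1 ▸ h
      · exact ih r h1
    · simp

theorem pvRunLen_drop_head (s : Int) (xs : List Int) :
    ∀ y ys, xs.drop (pvRunLen s xs) = y :: ys → pvSign y ≠ s := by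
  induction xs with
  | nil => simp
  | cons x xs ih =>
    simp only [pvRunLen]
    split
    · rename_i h
      intro y ys hy
      exact ih y ys (by simpa using hy)
    · rename_i h
      intro y ys hy
      simp only [List.drop_zero] at hy
      cases hy
      exact h

-- A's fold over a run of positive elements
theorem foldA_pos (run : List Int) : ∀ (lp ll cp cl : Int),
    (∀ r ∈ run, 0 < r) → cp ≤ lp → 0 ≤ ll →
    List.foldl pvStepA (lp, ll, cp, cl) run =
      (max lp (cp + run.length), ll, cp + run.length, if run.length = 0 then cl else 0) := by
  induction run with
  | nil => intro lp ll cp cl _ hle _; simp [max_eq_left hle]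
  | cons r rs ih =>
    intro lp ll cp cl hall hle hll
    have hr : 0 < r := hall r (by simp)
    rw [List.foldl_cons]
    have hstep : pvStepA (lp, ll, cp, cl) r = (max lp (cp + 1), ll, cp + 1, 0) := by
      rw [pvStepA_eq, if_pos hr, max_eq_left hll]
    rw [hstep, ih _ _ _ _ (fun x hx => hall x (List.mem_cons_of_mem _ hx)) (le_max_right _ _) hll]
    simp only [List.length_cons, Prod.mk.injEq, max_def]
    push_cast
    split_ifs <;> simp_all <;> omega

-- A's fold over a run of negative elements
theorem foldA_neg (run : List Int) : ∀ (lp ll cp cl : Int),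
    (∀ r ∈ run, r < 0) → cl ≤ ll → 0 ≤ lp →
    List.foldl pvStepA (lp, ll, cp, cl) run =
      (lp, max ll (cl + run.length), if run.length = 0 then cp else 0, cl + run.length) := by
  induction run with
  | nil => intro lp ll cp cl _ hle _; simp [max_eq_left hle]
  | cons r rs ih =>
    intro lp ll cp cl hall hle hlp
    have hr : r < 0 := hall r (by simp)
    rw [List.foldl_cons]
    have hstep : pvStepA (lp, ll, cp, cl) r = (lp, max ll (cl + 1), 0, cl + 1) := by
      rw [pvStepA_eq, if_neg (by omega : ¬ 0 < r), if_pos hr, max_eq_left hlp]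
    rw [hstep, ih _ _ _ _ (fun x hx => hall x (List.mem_cons_of_mem _ hx)) (le_max_right _ _) hlp]
    simp only [List.length_cons, Prod.mk.injEq, max_def]
    push_cast
    split_ifs <;> simp_all <;> omega

-- A's fold over a run of zero elements
theorem foldA_zero (run : List Int) : ∀ (lp ll : Int),
    (∀ r ∈ run, r = 0) → 0 ≤ lp → 0 ≤ ll →
    List.foldl pvStepA (lp, ll, 0, 0) run = (lp, ll, 0, 0) := by
  induction run with
  | nil => intro lp ll _ _ _; rfl
  | cons r rs ih =>
    intro lp ll hall hlp hll
    have hr : r = 0 := hall r (by simp)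
    rw [List.foldl_cons]
    have hstep : pvStepA (lp, ll, 0, 0) r = (lp, ll, 0, 0) := by
      subst hr
      rw [pvStepA_eq, if_neg (by omega : ¬ (0:Int) < 0), if_neg (by omega : ¬ (0:Int) < 0),
        max_eq_left hlp, max_eq_left hll]
    rw [hstep, ih lp ll (fun x hx => hall x (List.mem_cons_of_mem _ hx)) hlp hll]

-- A's leftover current-streak counters are irrelevant when the next element breaks the streak
theorem foldA_reset (xs : List Int) (lp ll cp cl : Int)
    (h : ∀ y ys, xs = y :: ys → (0 < y → cp = 0) ∧ (y < 0 → cl = 0)) :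
    ((List.foldl pvStepA (lp, ll, cp, cl) xs).1, (List.foldl pvStepA (lp, ll, cp, cl) xs).2.1) =
    ((List.foldl pvStepA (lp, ll, 0, 0) xs).1, (List.foldl pvStepA (lp, ll, 0, 0) xs).2.1) := by
  cases xs with
  | nil => rfl
  | cons y ys =>
    obtain ⟨hcp, hcl⟩ := h y ys rfl
    have hstep : pvStepA (lp, ll, cp, cl) y = pvStepA (lp, ll, 0, 0) y := by
      rw [pvStepA_eq, pvStepA_eq]
      rcases lt_trichotomy y 0 with hy | hy | hy
      · rw [if_neg (by omega : ¬ (0:Int) < y), if_neg (by omega : ¬ (0:Int) < y),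
          if_pos hy, if_pos hy, hcl hy]
      · subst hy; rfl
      · rw [if_pos hy, if_pos hy, hcp hy]
    rw [List.foldl_cons, List.foldl_cons, hstep]

theorem pvMain : ∀ (n : Nat) (xs : List Int), xs.length ≤ n → ∀ (lp ll : Int), 0 ≤ lp → 0 ≤ ll →
    ((List.foldl pvStepA (lp, ll, 0, 0) xs).1, (List.foldl pvStepA (lp, ll, 0, 0) xs).2.1) =
      pvGo xs lp ll := by
  intro n
  induction n with
  | zero =>
    intro xs hlen lp ll _ _
    have : xs = [] := List.length_eq_zero_iff.mp (Nat.le_zero.mp hlen)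
    subst this; simp [pvGo]
  | succ n ih =>
    intro xs hlen lp ll hlp hll
    cases xs with
    | nil => simp [pvGo]
    | cons x xs =>
      set s := pvSign x with hs
      set k := pvRunLen s xs with hk
      have hkle : k ≤ xs.length := pvRunLen_le s xs
      have hsplit : xs = xs.take k ++ xs.drop k := (List.take_append_drop k xs).symm
      have htklen : (xs.take k).length = k := by simp [hkle]
      have hlen' : xs.length ≤ n := by simp at hlen; omega
      have hdlen : (xs.drop k).length ≤ n := by rw [List.length_drop]; omega
      have htake : ∀ r ∈ xs.take k, pvSign r = s := pvRunLen_take s xs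
      have hdrop : ∀ y ys, xs.drop k = y :: ys → pvSign y ≠ s := pvRunLen_drop_head s xs
      have hgo : pvGo (x :: xs) lp ll =
          pvGo (xs.drop k) (if s = 1 then max lp ((k : Int) + 1) else lp)
            (if s = -1 then max ll ((k : Int) + 1) else ll) := by
        conv_lhs => rw [pvGo]
      rw [hgo]
      rcases lt_trichotomy x 0 with hx | hx | hx
      · -- negative head: the whole leading run is negative
        have hs1 : s = -1 := by rw [hs]; exact pvSign_eq_negone.mpr hx
        have hstep : pvStepA (lp, ll, 0, 0) x = (lp, max ll 1, 0, 1) := by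
          rw [pvStepA_eq, if_neg (by omega : ¬ 0 < x), if_pos hx, max_eq_left hlp]
          norm_num
        have hnegrun : ∀ r ∈ xs.take k, r < 0 := fun r hr =>
          pvSign_eq_negone.mp ((htake r hr).trans hs1)
        have hA : List.foldl pvStepA (lp, ll, 0, 0) (x :: xs) =
            List.foldl pvStepA (lp, max ll ((k : Int) + 1), 0, 1 + (k : Int)) (xs.drop k) := by
          rw [List.foldl_cons, hstep]
          conv_lhs => rw [hsplit]
          rw [List.foldl_append,
            foldA_neg (xs.take k) lp (max ll 1) 0 1 hnegrun (le_max_right _ _) hlp, htklen]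
          congr 1
          have h1 : max (max ll 1) (1 + (k:Int)) = max ll ((k:Int) + 1) := by
            rw [max_def, max_def, max_def]; split_ifs <;> omega
          have h2 : (if k = 0 then (0:Int) else 0) = 0 := by split_ifs <;> rfl
          rw [h1, h2]
        rw [hA, if_neg (by rw [hs1]; norm_num), if_pos hs1]
        refine (foldA_reset _ _ _ _ _ ?_).trans
          (ih (xs.drop k) hdlen lp (max ll ((k : Int) + 1)) hlp (le_trans hll (le_max_left _ _)))
        intro y ys hy
        have hne := hdrop y ys hy
        exact ⟨fun _ => rfl, fun hneg => absurd ((pvSign_eq_negone.mpr hneg).trans hs1.symm) hne⟩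
      · -- zero head: the whole leading run is zero
        have hs1 : s = 0 := by rw [hs]; exact pvSign_eq_zero.mpr hx
        have hstep : pvStepA (lp, ll, 0, 0) x = (lp, ll, 0, 0) := by
          subst hx
          rw [pvStepA_eq, if_neg (by omega : ¬ (0:Int) < 0), if_neg (by omega : ¬ (0:Int) < 0),
            max_eq_left hlp, max_eq_left hll]
        have hzerorun : ∀ r ∈ xs.take k, r = 0 := fun r hr =>
          pvSign_eq_zero.mp ((htake r hr).trans hs1)
        have hA : List.foldl pvStepA (lp, ll, 0, 0) (x :: xs) =
            List.foldl pvStepA (lp, ll, 0, 0) (xs.drop k) := by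
          rw [List.foldl_cons, hstep]
          conv_lhs => rw [hsplit]
          rw [List.foldl_append, foldA_zero (xs.take k) lp ll hzerorun hlp hll]
        rw [hA, if_neg (by rw [hs1]; norm_num), if_neg (by rw [hs1]; norm_num)]
        exact ih (xs.drop k) hdlen lp ll hlp hll
      · -- positive head: the whole leading run is positive
        have hs1 : s = 1 := by rw [hs]; exact pvSign_eq_one.mpr hx
        have hstep : pvStepA (lp, ll, 0, 0) x = (max lp 1, ll, 1, 0) := by
          rw [pvStepA_eq, if_pos hx, max_eq_left hll]
          norm_num
        have hposrun : ∀ r ∈ xs.take k, 0 < r := fun r hr =>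
          pvSign_eq_one.mp ((htake r hr).trans hs1)
        have hA : List.foldl pvStepA (lp, ll, 0, 0) (x :: xs) =
            List.foldl pvStepA (max lp ((k : Int) + 1), ll, 1 + (k : Int), 0) (xs.drop k) := by
          rw [List.foldl_cons, hstep]
          conv_lhs => rw [hsplit]
          rw [List.foldl_append,
            foldA_pos (xs.take k) (max lp 1) ll 1 0 hposrun (le_max_right _ _) hll, htklen]
          congr 1
          have h1 : max (max lp 1) (1 + (k:Int)) = max lp ((k:Int) + 1) := by
            rw [max_def, max_def, max_def]; split_ifs <;> omega
          have h2 : (if k = 0 then (0:Int) else 0) = 0 := by split_ifs <;> rfl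
          rw [h1, h2]
        rw [hA, if_pos hs1, if_neg (by rw [hs1]; norm_num)]
        refine (foldA_reset _ _ _ _ _ ?_).trans
          (ih (xs.drop k) hdlen (max lp ((k : Int) + 1)) ll (le_trans hlp (le_max_left _ _)) hll)
        intro y ys hy
        have hne := hdrop y ys hy
        exact ⟨fun hpos => absurd ((pvSign_eq_one.mpr hpos).trans hs1.symm) hne, fun _ => rfl⟩

-- ===== VERDICT (by name: the statement is the Claim_ definition above) =====
theorem calculate_longest_profit_loss_streak_spec : Claim_equal_calculate_longest_profit_loss_streak := by
  intro returns _
  unfold Spec_calculate_longest_profit_loss_streak calculate_longest_profit_loss_streak calculate_longest_profit_loss_streak_alt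
  exact pvMain returns.length returns le_rfl 0 0 le_rfl le_rfl
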